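-- pv_equiv track=rewrite | github.com/Chmlgy/coupling_for_verification | single_input_d_probing.py | project_matrix
-- ===== SOURCE A (Python) =====
-- import itertools
--
-- def get_wire_names():
--     return ["w0", "w1", "w2"]
--
-- def project_matrix(full_rows, full_cols, full_matrix, observation_set):
--     all_wires = get_wire_names()
--     indices = [all_wires.index(w) for w in observation_set]
--
--     proj_space = list(itertools.product([0, 1], repeat=len(observation_set)))
--
--     proj_matrix = {
--         row: {col: [] for col in proj_space}
--         for row in proj_space
--     }
--
--     for r_full in full_rows:
--         r_proj = tuple(r_full[i] for i in indices)
--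
--         for c_full in full_cols:
--             c_proj = tuple(c_full[i] for i in indices)
--
--             entries = full_matrix[r_full][c_full]
--
--             if entries:
--                 proj_matrix[r_proj][c_proj].extend(entries)
--
--     return proj_space, proj_space, proj_matrix
-- ===== SOURCE B (Python) =====
-- import itertools
--
-- def get_wire_names():
--     return ["w0", "w1", "w2"]
--
-- def project_matrix(full_rows, full_cols, full_matrix, observation_set):
--     # Group-then-reduce: index rows/cols by their projection, then fill each
--     # projected cell from its two groups in one pass per cell.
--     all_wires = get_wire_names()
--     indices = [all_wires.index(w) for w in observation_set]
--
--     proj_space = list(itertools.product([0, 1], repeat=len(observation_set)))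
--
--     row_groups = {}
--     for r in full_rows:
--         row_groups.setdefault(tuple(r[i] for i in indices), []).append(r)
--     col_groups = {}
--     for c in full_cols:
--         col_groups.setdefault(tuple(c[i] for i in indices), []).append(c)
--
--     proj_matrix = {
--         row: {col: [] for col in proj_space}
--         for row in proj_space
--     }
--
--     for r_proj, rs in row_groups.items():
--         for c_proj, cs in col_groups.items():
--             bucket = []
--             for r in rs:
--                 for c in cs:
--                     bucket.extend(full_matrix[r][c])
--             if bucket:
--                 proj_matrix[r_proj][c_proj].extend(bucket)
--
--     return proj_space, proj_space, proj_matrix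
-- ===== Notes on version B (the rewrite author's own statement) =====
-- stated objective: alternative
-- what changed: B first builds two insertion-ordered dicts grouping full rows and cols by their projected tuple, then fills each projected cell once from the row-group x col-group pair (group-then-reduce), instead of A's flat scan over all (row, col) pairs updating cells one entry-list at a time.
import Mathlib
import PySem

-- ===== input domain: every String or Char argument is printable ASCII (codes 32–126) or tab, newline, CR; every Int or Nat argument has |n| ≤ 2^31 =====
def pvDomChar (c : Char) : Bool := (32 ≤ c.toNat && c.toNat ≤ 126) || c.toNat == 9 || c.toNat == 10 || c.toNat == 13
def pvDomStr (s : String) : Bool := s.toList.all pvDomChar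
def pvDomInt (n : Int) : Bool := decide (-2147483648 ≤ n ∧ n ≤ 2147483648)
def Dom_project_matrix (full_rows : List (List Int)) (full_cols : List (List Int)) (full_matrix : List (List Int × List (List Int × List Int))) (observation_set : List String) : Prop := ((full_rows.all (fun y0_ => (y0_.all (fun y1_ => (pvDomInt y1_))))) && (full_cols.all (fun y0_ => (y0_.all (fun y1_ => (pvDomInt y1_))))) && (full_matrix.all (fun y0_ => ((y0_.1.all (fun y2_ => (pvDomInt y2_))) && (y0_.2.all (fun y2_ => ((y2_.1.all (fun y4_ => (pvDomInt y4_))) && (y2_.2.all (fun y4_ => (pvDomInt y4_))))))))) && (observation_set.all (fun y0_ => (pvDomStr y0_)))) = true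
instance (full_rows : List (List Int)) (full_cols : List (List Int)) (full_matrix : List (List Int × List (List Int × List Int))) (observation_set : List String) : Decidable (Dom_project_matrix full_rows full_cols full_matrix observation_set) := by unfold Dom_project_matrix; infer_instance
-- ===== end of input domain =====

-- B groups rows/cols by their projection first and fills each projected cell from its
-- two groups (alternative decomposition, same asymptotic cost); return values proved equal.

-- ===== PORT A =====
-- shared helpers (both Python versions contain these exact computations)
def pvWires : List String := ["w0", "w1", "w2"]          -- get_wire_names()

-- [all_wires.index(w) for w in observation_set]  (index raises on absent w: outside Pre_)
def pvIndices (observation_set : List String) : List Int :=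
  observation_set.map (fun w => (((PySem.List.index? pvWires w).getD 0 : Nat) : Int))

-- tuple(r[i] for i in indices)  (r[i] raises out of range: outside Pre_)
def pvProj (observation_set : List String) (r : List Int) : List Int :=
  (pvIndices observation_set).map (fun i => PySem.List.pyGetD r i 0)

-- list(itertools.product([0, 1], repeat=n)) : hand port, exact (lexicographic 0/1 tuples)
def pvSpace : Nat → List (List Int)
  | 0 => [[]]
  | n + 1 => ([0, 1] : List Int).flatMap (fun b => (pvSpace n).map (fun t => b :: t))

-- full_matrix[r][c]  (KeyError on missing key: outside Pre_)
def pvEntry (full_matrix : List (List Int × List (List Int × List Int))) (r c : List Int) : List Int :=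
  (PySem.Dict.mk ((PySem.Dict.mk full_matrix).getD r [])).getD c []

-- {row: {col: [] for col in proj_space} for row in proj_space}
def pvInit (n : Nat) : PySem.Dict (List Int) (PySem.Dict (List Int) (List Int)) :=
  PySem.Dict.mk ((pvSpace n).map (fun row =>
    (row, PySem.Dict.mk ((pvSpace n).map (fun col => (col, ([] : List Int)))))))

def project_matrix (full_rows : List (List Int)) (full_cols : List (List Int)) (full_matrix : List (List Int × List (List Int × List Int))) (observation_set : List String) : List (List Int) × List (List Int) × (List (List Int × List (List Int × List Int))) :=
  (pvSpace observation_set.length, pvSpace observation_set.length,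
    -- for r_full in full_rows: for c_full in full_cols: if entries: extend
    -- (proj_matrix[...][...] KeyError on absent key: outside Pre_)
    (full_rows.foldl (fun d r =>
      full_cols.foldl (fun d c =>
        if pvEntry full_matrix r c ≠ [] then
          d.modify (pvProj observation_set r) PySem.Dict.empty
            (fun inner => inner.modify (pvProj observation_set c) [] (fun v => v ++ pvEntry full_matrix r c))
        else d) d) (pvInit observation_set.length)).items.map (fun p => (p.1, p.2.items)))

-- ===== PORT B =====
-- groups.setdefault(proj(x), []).append(x) over a list
def pvGroups (observation_set : List String) (xs : List (List Int)) :
    PySem.Dict (List Int) (List (List Int)) :=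
  xs.foldl (fun g x => g.modify (pvProj observation_set x) [] (fun l => l ++ [x])) PySem.Dict.empty

def project_matrix_alt (full_rows : List (List Int)) (full_cols : List (List Int)) (full_matrix : List (List Int × List (List Int × List Int))) (observation_set : List String) : List (List Int) × List (List Int) × (List (List Int × List (List Int × List Int))) :=
  (pvSpace observation_set.length, pvSpace observation_set.length,
    -- for r_proj, rs in row_groups.items(): for c_proj, cs in col_groups.items():
    --   bucket = all entries of rs × cs; if bucket: extend the cell once
    (((pvGroups observation_set full_rows).items.foldl (fun d p =>
      (pvGroups observation_set full_cols).items.foldl (fun d q =>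
        let bucket := p.2.foldl (fun b r => q.2.foldl (fun b c => b ++ pvEntry full_matrix r c) b) []
        if bucket ≠ [] then
          d.modify p.1 PySem.Dict.empty
            (fun inner => inner.modify q.1 [] (fun v => v ++ bucket))
        else d) d) (pvInit observation_set.length)).items.map (fun p => (p.1, p.2.items))))

-- ===== PRECONDITION & SPEC =====
-- Pre_ holds where the Python A returns without exception: every observed wire exists, every
-- indexed position of every row AND column is in range, every (row, col) lookup key is present,
-- and any pair with nonempty entries projects into the 0/1 grid (else A raises ValueError/
-- IndexError/KeyError).  Pre_ additionally excludes inputs with empty full_rows but a column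
-- too short for an observed index: A returns an empty grid there only because its dead inner
-- loop never projects the columns, while B's natural column grouping raises IndexError.
def Pre_project_matrix (full_rows : List (List Int)) (full_cols : List (List Int)) (full_matrix : List (List Int × List (List Int × List Int))) (observation_set : List String) : Prop :=
  (∀ w ∈ observation_set, w ∈ pvWires) ∧
  (∀ r ∈ full_rows, ∀ i ∈ pvIndices observation_set, PySem.Raise.InRange r.length i) ∧
  (∀ c ∈ full_cols, ∀ i ∈ pvIndices observation_set, PySem.Raise.InRange c.length i) ∧
  (∀ r ∈ full_rows, ∀ c ∈ full_cols,
    (PySem.Dict.mk full_matrix).contains r = true ∧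
    (PySem.Dict.mk ((PySem.Dict.mk full_matrix).getD r [])).contains c = true) ∧
  (∀ r ∈ full_rows, ∀ c ∈ full_cols, pvEntry full_matrix r c ≠ [] →
    (∀ x ∈ pvProj observation_set r, x = 0 ∨ x = 1) ∧
    (∀ x ∈ pvProj observation_set c, x = 0 ∨ x = 1))
instance (full_rows : List (List Int)) (full_cols : List (List Int)) (full_matrix : List (List Int × List (List Int × List Int))) (observation_set : List String) : Decidable (Pre_project_matrix full_rows full_cols full_matrix observation_set) := by unfold Pre_project_matrix; infer_instance

def pvWitness_project_matrix : List (List Int) × List (List Int) × (List (List Int × List (List Int × List Int))) × List String :=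
  ([[0]], [[1]], [([0], [([1], [5])])], ["w0"])

def Spec_project_matrix (full_rows : List (List Int)) (full_cols : List (List Int)) (full_matrix : List (List Int × List (List Int × List Int))) (observation_set : List String) (out : List (List Int) × List (List Int) × (List (List Int × List (List Int × List Int)))) : Prop := out = project_matrix_alt full_rows full_cols full_matrix observation_set
instance (full_rows : List (List Int)) (full_cols : List (List Int)) (full_matrix : List (List Int × List (List Int × List Int))) (observation_set : List String) (out : List (List Int) × List (List Int) × (List (List Int × List (List Int × List Int)))) : Decidable (Spec_project_matrix full_rows full_cols full_matrix observation_set out) := by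
  unfold Spec_project_matrix
  exact @instDecidableEqProd _ _ inferInstance (@instDecidableEqProd _ _ inferInstance inferInstance) _ _

-- ===== CLAIM (what is proved, stated in full; the proofs are below) =====
def Claim_equal_project_matrix : Prop := ∀ (full_rows : List (List Int)) (full_cols : List (List Int)) (full_matrix : List (List Int × List (List Int × List Int))) (observation_set : List String), Dom_project_matrix full_rows full_cols full_matrix observation_set → Pre_project_matrix full_rows full_cols full_matrix observation_set → Spec_project_matrix full_rows full_cols full_matrix observation_set (project_matrix full_rows full_cols full_matrix observation_set)

-- ===== LEMMAS AND PROOFS =====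

-- value of a nested-dict cell
def pvVal (d : PySem.Dict (List Int) (PySem.Dict (List Int) (List Int))) (row col : List Int) : List Int :=
  (d.getD row PySem.Dict.empty).getD col []

-- the common value both loops compute for a cell
def pvCell (full_rows full_cols : List (List Int)) (full_matrix : List (List Int × List (List Int × List Int))) (observation_set : List String) (row col : List Int) : List Int :=
  (full_rows.filter (fun r => pvProj observation_set r = row)).flatMap (fun r =>
    (full_cols.filter (fun c => pvProj observation_set c = col)).flatMap (fun c =>
      pvEntry full_matrix r c))

lemma get?_mk_map {κ ν : Type} [BEq κ] [LawfulBEq κ] (l : List κ) (f : κ → ν) (x : κ) :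
    (PySem.Dict.mk (l.map (fun k => (k, f k)))).get? x = if x ∈ l then some (f x) else none := by
  induction l with
  | nil => simp [PySem.Dict.get?]
  | cons a t ih =>
    simp only [List.map_cons, PySem.Dict.get?_mk_cons, ih, List.mem_cons]
    by_cases h : a = x
    · simp [h]
    · simp [h, Ne.symm h, beq_iff_eq]

lemma getD_mk_map {κ ν : Type} [BEq κ] [LawfulBEq κ] (l : List κ) (f : κ → ν) (x : κ) (d0 : ν) :
    (PySem.Dict.mk (l.map (fun k => (k, f k)))).getD x d0 = if x ∈ l then f x else d0 := by
  rw [PySem.Dict.getD_eq_get?_getD, get?_mk_map]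
  split_ifs <;> rfl

lemma nodup_filter_eq {α : Type} [DecidableEq α] (l : List α) (h : l.Nodup) (a : α) :
    l.filter (fun x => x = a) = if a ∈ l then [a] else [] := by
  induction l with
  | nil => simp
  | cons b t ih =>
    simp only [List.filter_cons, List.mem_cons]
    rcases List.nodup_cons.mp h with ⟨hb, ht⟩
    by_cases hba : b = a
    · subst hba
      simp [ih ht, hb]
    · simp [hba, ih ht, Ne.symm hba]

lemma pvVal_init (n : Nat) (row col : List Int) : pvVal (pvInit n) row col = [] := by
  unfold pvVal pvInit
  rw [getD_mk_map]
  split_ifs with h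
  · rw [getD_mk_map]
    split_ifs <;> rfl
  · simp [PySem.Dict.getD_empty]

lemma nodup_pvSpace (n : Nat) : (pvSpace n).Nodup := by
  induction n with
  | zero => simp [pvSpace]
  | succ m ih =>
    have h0 : ((pvSpace m).map (fun t => (0 : Int) :: t)).Nodup :=
      ih.map (fun a b h => by simpa using h)
    have h1 : ((pvSpace m).map (fun t => (1 : Int) :: t)).Nodup :=
      ih.map (fun a b h => by simpa using h)
    have hdisj : List.Disjoint ((pvSpace m).map (fun t => (0 : Int) :: t))
        ((pvSpace m).map (fun t => (1 : Int) :: t)) := by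
      intro x hx hx'
      rcases List.mem_map.mp hx with ⟨a, _, rfl⟩
      rcases List.mem_map.mp hx' with ⟨b, _, hb⟩
      simp at hb
    simpa [pvSpace, List.flatMap_cons, List.flatMap_nil, List.append_nil] using
      h0.append h1 hdisj

lemma keys_pvInit (n : Nat) : (pvInit n).keys = pvSpace n := by
  unfold pvInit
  simp [PySem.Dict.keys_mk, List.map_map, Function.comp_def]

lemma inner_keys_pvInit (n : Nat) (row : List Int) (h : row ∈ pvSpace n) :
    ((pvInit n).getD row PySem.Dict.empty).keys = pvSpace n := by
  unfold pvInit
  rw [getD_mk_map, if_pos h]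
  simp [PySem.Dict.keys_mk, List.map_map, Function.comp_def]

-- A-side value characterisation
lemma valA_inner (fm : List (List Int × List (List Int × List Int))) (obs : List String)
    (cols : List (List Int)) (d : PySem.Dict (List Int) (PySem.Dict (List Int) (List Int)))
    (r row col : List Int) :
    pvVal (cols.foldl (fun d c =>
        if pvEntry fm r c ≠ [] then
          d.modify (pvProj obs r) PySem.Dict.empty
            (fun inner => inner.modify (pvProj obs c) [] (fun v => v ++ pvEntry fm r c))
        else d) d) row col
    = pvVal d row col ++
      (if pvProj obs r = row then
        (cols.filter (fun c => pvProj obs c = col)).flatMap (fun c => pvEntry fm r c)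
       else []) := by
  induction cols generalizing d with
  | nil => simp
  | cons c cs ih =>
    simp only [List.foldl_cons]
    rw [ih]
    have hstep : pvVal (if pvEntry fm r c ≠ [] then
          d.modify (pvProj obs r) PySem.Dict.empty
            (fun inner => inner.modify (pvProj obs c) [] (fun v => v ++ pvEntry fm r c))
        else d) row col
        = pvVal d row col ++
          (if pvProj obs r = row then (if pvProj obs c = col then pvEntry fm r c else [])
           else []) := by
      by_cases hE : pvEntry fm r c = []
      · simp [hE]
      · rw [if_pos hE]
        unfold pvVal
        rw [PySem.Dict.getD_modify]
        by_cases h1 : row = pvProj obs r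
        · subst h1
          rw [if_pos rfl, if_pos rfl, PySem.Dict.getD_modify]
          by_cases h2 : col = pvProj obs c
          · subst h2
            rw [if_pos rfl, if_pos rfl]
          · rw [if_neg h2, if_neg (fun h => h2 h.symm), List.append_nil]
        · rw [if_neg h1, if_neg (fun h => h1 h.symm), List.append_nil]
    rw [hstep, List.append_assoc]
    congr 1
    by_cases h1 : pvProj obs r = row
    · by_cases h2 : pvProj obs c = col
      · simp [h1, h2]
      · simp [h1, h2]
    · simp [h1]

lemma valA_outer (fm : List (List Int × List (List Int × List Int))) (obs : List String)
    (rows cols : List (List Int)) (d : PySem.Dict (List Int) (PySem.Dict (List Int) (List Int)))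
    (row col : List Int) :
    pvVal (rows.foldl (fun d r => cols.foldl (fun d c =>
        if pvEntry fm r c ≠ [] then
          d.modify (pvProj obs r) PySem.Dict.empty
            (fun inner => inner.modify (pvProj obs c) [] (fun v => v ++ pvEntry fm r c))
        else d) d) d) row col
    = pvVal d row col ++ pvCell rows cols fm obs row col := by
  induction rows generalizing d with
  | nil => simp [pvCell]
  | cons r rs ih =>
    simp only [List.foldl_cons]
    rw [ih, valA_inner, List.append_assoc]
    congr 1
    unfold pvCell
    by_cases h1 : pvProj obs r = row
    · simp [h1]
    · simp [h1]

-- B-side: bucket is a flatMap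
lemma bucket_eq (fm : List (List Int × List (List Int × List Int))) (rs cs : List (List Int)) :
    rs.foldl (fun b r => cs.foldl (fun b c => b ++ pvEntry fm r c) b) []
    = rs.flatMap (fun r => cs.flatMap (fun c => pvEntry fm r c)) := by
  calc rs.foldl (fun b r => cs.foldl (fun b c => b ++ pvEntry fm r c) b) []
      = rs.foldl (fun b r => b ++ cs.flatMap (fun c => pvEntry fm r c)) [] := by
        apply PySem.List.foldl_congr_mem
        intro acc r _
        exact PySem.List.foldl_append_eq_flatMap _ _ _
    _ = _ := by
        simpa using PySem.List.foldl_append_eq_flatMap (fun r => cs.flatMap (fun c => pvEntry fm r c)) rs []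

-- B-side value characterisation over items lists
lemma valB_inner (fm : List (List Int × List (List Int × List Int)))
    (qs : List (List Int × List (List Int))) (d : PySem.Dict (List Int) (PySem.Dict (List Int) (List Int)))
    (p : List Int × List (List Int)) (row col : List Int) :
    pvVal (qs.foldl (fun d q =>
        let bucket := p.2.foldl (fun b r => q.2.foldl (fun b c => b ++ pvEntry fm r c) b) []
        if bucket ≠ [] then
          d.modify p.1 PySem.Dict.empty (fun inner => inner.modify q.1 [] (fun v => v ++ bucket))
        else d) d) row col
    = pvVal d row col ++
      (if p.1 = row then
        (qs.filter (fun q => q.1 = col)).flatMap (fun q =>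
          p.2.flatMap (fun r => q.2.flatMap (fun c => pvEntry fm r c)))
       else []) := by
  induction qs generalizing d with
  | nil => simp
  | cons q qs ih =>
    simp only [List.foldl_cons]
    rw [ih]
    have hstep : pvVal
        (let bucket := p.2.foldl (fun b r => q.2.foldl (fun b c => b ++ pvEntry fm r c) b) []
         if bucket ≠ [] then
          d.modify p.1 PySem.Dict.empty (fun inner => inner.modify q.1 [] (fun v => v ++ bucket))
         else d) row col
        = pvVal d row col ++
          (if p.1 = row then (if q.1 = col then
              p.2.flatMap (fun r => q.2.flatMap (fun c => pvEntry fm r c)) else [])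
           else []) := by
      simp only [bucket_eq]
      by_cases hB : p.2.flatMap (fun r => q.2.flatMap (fun c => pvEntry fm r c)) = []
      · simp [hB]
      · rw [if_pos hB]
        unfold pvVal
        rw [PySem.Dict.getD_modify]
        by_cases h1 : row = p.1
        · subst h1
          rw [if_pos rfl, if_pos rfl, PySem.Dict.getD_modify]
          by_cases h2 : col = q.1
          · subst h2
            rw [if_pos rfl, if_pos rfl]
          · rw [if_neg h2, if_neg (fun h => h2 h.symm), List.append_nil]
        · rw [if_neg h1, if_neg (fun h => h1 h.symm), List.append_nil]
    rw [hstep, List.append_assoc]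
    congr 1
    by_cases h1 : p.1 = row
    · by_cases h2 : q.1 = col
      · simp [h1, h2]
      · simp [h1, h2]
    · simp [h1]

lemma valB_outer (fm : List (List Int × List (List Int × List Int)))
    (ps qs : List (List Int × List (List Int))) (d : PySem.Dict (List Int) (PySem.Dict (List Int) (List Int)))
    (row col : List Int) :
    pvVal (ps.foldl (fun d p => qs.foldl (fun d q =>
        let bucket := p.2.foldl (fun b r => q.2.foldl (fun b c => b ++ pvEntry fm r c) b) []
        if bucket ≠ [] then
          d.modify p.1 PySem.Dict.empty (fun inner => inner.modify q.1 [] (fun v => v ++ bucket))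
        else d) d) d) row col
    = pvVal d row col ++
      (ps.filter (fun p => p.1 = row)).flatMap (fun p =>
        (qs.filter (fun q => q.1 = col)).flatMap (fun q =>
          p.2.flatMap (fun r => q.2.flatMap (fun c => pvEntry fm r c)))) := by
  induction ps generalizing d with
  | nil => simp
  | cons p ps ih =>
    simp only [List.foldl_cons]
    rw [ih, valB_inner, List.append_assoc]
    congr 1
    by_cases h1 : p.1 = row
    · simp [h1]
    · simp [h1]

-- group dict characterisation
lemma getD_pvGroups (obs : List String) (xs : List (List Int)) (k : List Int) :
    (pvGroups obs xs).getD k [] = xs.filter (fun x => pvProj obs x = k) := by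
  have h2 := @List.foldl_map (List Int) (List Int × List Int)
    (PySem.Dict (List Int) (List (List Int))) (fun x => (pvProj obs x, x))
    (fun g p => g.modify p.1 [] (fun l => l ++ [p.2])) xs PySem.Dict.empty
  have h3 : (pvGroups obs xs).getD k []
      = ((xs.map (fun x => (pvProj obs x, x))).foldl
          (fun g p => g.modify p.1 [] (fun l => l ++ [p.2])) PySem.Dict.empty).getD k [] := by
    unfold pvGroups
    exact congrArg (fun d => d.getD k []) h2.symm
  rw [h3, PySem.Dict.getD_foldl_modify_append]
  simp only [PySem.Dict.getD_empty, List.nil_append, List.filter_map, List.map_map,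
    Function.comp_def, List.map_id']
  refine List.filter_congr ?_
  intro x _
  exact Bool.beq_eq_decide_eq _ _

lemma nodup_keys_pvGroups (obs : List String) (xs : List (List Int)) :
    (pvGroups obs xs).keys.Nodup := by
  unfold pvGroups
  exact PySem.Dict.nodup_keys_foldl_modify_key xs (pvProj obs) [] (fun _ x l => l ++ [x])
    PySem.Dict.empty (by simp [PySem.Dict.keys_empty])

lemma mem_pvGroups_val (obs : List String) (xs : List (List Int)) (p : List Int × List (List Int))
    (hp : p ∈ (pvGroups obs xs).items) : p.2 = xs.filter (fun x => pvProj obs x = p.1) := by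
  have hnd := nodup_keys_pvGroups obs xs
  have h := PySem.Dict.getD_of_mem_items (pvGroups obs xs) (k := p.1) (v := p.2)
    (by simpa using hp) hnd []
  exact h.symm.trans (getD_pvGroups obs xs p.1)

-- keys invariants (under Pre_, every update hits an existing 0/1 key, so the grid shape is stable)
lemma length_pvProj (obs : List String) (r : List Int) : (pvProj obs r).length = obs.length := by
  simp [pvProj, pvIndices]

lemma mem_pvSpace (n : Nat) (l : List Int) :
    l ∈ pvSpace n ↔ l.length = n ∧ ∀ x ∈ l, x = 0 ∨ x = 1 := by
  induction n generalizing l with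
  | zero =>
    simp only [pvSpace, List.mem_singleton]
    constructor
    · rintro rfl; simp
    · rintro ⟨hlen, _⟩; exact List.eq_nil_of_length_eq_zero hlen
  | succ m ih =>
    simp only [pvSpace, List.mem_flatMap, List.mem_map, List.mem_cons,
      List.not_mem_nil, or_false]
    constructor
    · rintro ⟨b, hb, t, ht, rfl⟩
      obtain ⟨hlen, hall⟩ := (ih t).mp ht
      refine ⟨by simp [hlen], ?_⟩
      intro x hx
      rcases List.mem_cons.mp hx with rfl | hx
      · rcases hb with rfl | rfl
        · exact Or.inl rfl
        · exact Or.inr rfl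
      · exact hall x hx
    · rintro ⟨hlen, hall⟩
      cases l with
      | nil => simp at hlen
      | cons x t =>
        refine ⟨x, ?_, t, (ih t).mpr ⟨by simpa using hlen, fun y hy => hall y (List.mem_cons_of_mem _ hy)⟩, rfl⟩
        rcases hall x List.mem_cons_self with rfl | rfl
        · exact Or.inl rfl
        · exact Or.inr rfl

lemma keysA_inner (fm : List (List Int × List (List Int × List Int))) (obs : List String) (n : Nat)
    (cols : List (List Int)) (r : List Int) (d : PySem.Dict (List Int) (PySem.Dict (List Int) (List Int)))
    (h : ∀ c ∈ cols, pvEntry fm r c ≠ [] → pvProj obs r ∈ pvSpace n ∧ pvProj obs c ∈ pvSpace n)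
    (hd : d.keys = pvSpace n)
    (hin : ∀ row ∈ pvSpace n, (d.getD row PySem.Dict.empty).keys = pvSpace n) :
    (cols.foldl (fun d c =>
        if pvEntry fm r c ≠ [] then
          d.modify (pvProj obs r) PySem.Dict.empty
            (fun inner => inner.modify (pvProj obs c) [] (fun v => v ++ pvEntry fm r c))
        else d) d).keys = pvSpace n ∧
    ∀ row ∈ pvSpace n, ((cols.foldl (fun d c =>
        if pvEntry fm r c ≠ [] then
          d.modify (pvProj obs r) PySem.Dict.empty
            (fun inner => inner.modify (pvProj obs c) [] (fun v => v ++ pvEntry fm r c))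
        else d) d).getD row PySem.Dict.empty).keys = pvSpace n := by
  induction cols generalizing d with
  | nil => exact ⟨hd, hin⟩
  | cons c cs ih =>
    simp only [List.foldl_cons]
    refine ih _ (fun c' hc' => h c' (List.mem_cons_of_mem _ hc')) ?_ ?_
    · by_cases hE : pvEntry fm r c = []
      · simpa [hE] using hd
      · obtain ⟨hr, hc⟩ := h c (List.mem_cons_self) hE
        rw [if_pos hE, PySem.Dict.keys_modify, PySem.Dict.keys_insert_of_contains]
        · exact hd
        · exact (PySem.Dict.contains_iff_mem_keys _ _).mpr (hd ▸ hr)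
    · intro row hrow
      by_cases hE : pvEntry fm r c = []
      · simpa [hE] using hin row hrow
      · obtain ⟨hr, hc⟩ := h c (List.mem_cons_self) hE
        rw [if_pos hE, PySem.Dict.getD_modify]
        by_cases h1 : row = pvProj obs r
        · rw [if_pos h1, PySem.Dict.keys_modify, PySem.Dict.keys_insert_of_contains]
          · exact hin _ hr
          · refine (PySem.Dict.contains_iff_mem_keys _ _).mpr ?_
            rw [hin _ hr]; exact hc
        · rw [if_neg h1]; exact hin row hrow

lemma keysA_outer (fm : List (List Int × List (List Int × List Int))) (obs : List String) (n : Nat)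
    (rows cols : List (List Int)) (d : PySem.Dict (List Int) (PySem.Dict (List Int) (List Int)))
    (h : ∀ r ∈ rows, ∀ c ∈ cols, pvEntry fm r c ≠ [] → pvProj obs r ∈ pvSpace n ∧ pvProj obs c ∈ pvSpace n)
    (hd : d.keys = pvSpace n)
    (hin : ∀ row ∈ pvSpace n, (d.getD row PySem.Dict.empty).keys = pvSpace n) :
    (rows.foldl (fun d r => cols.foldl (fun d c =>
        if pvEntry fm r c ≠ [] then
          d.modify (pvProj obs r) PySem.Dict.empty
            (fun inner => inner.modify (pvProj obs c) [] (fun v => v ++ pvEntry fm r c))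
        else d) d) d).keys = pvSpace n ∧
    ∀ row ∈ pvSpace n, ((rows.foldl (fun d r => cols.foldl (fun d c =>
        if pvEntry fm r c ≠ [] then
          d.modify (pvProj obs r) PySem.Dict.empty
            (fun inner => inner.modify (pvProj obs c) [] (fun v => v ++ pvEntry fm r c))
        else d) d) d).getD row PySem.Dict.empty).keys = pvSpace n := by
  induction rows generalizing d with
  | nil => exact ⟨hd, hin⟩
  | cons r rs ih =>
    simp only [List.foldl_cons]
    have hstep := keysA_inner fm obs n cols r d (h r (List.mem_cons_self)) hd hin
    exact ih _ (fun r' hr' => h r' (List.mem_cons_of_mem _ hr')) hstep.1 hstep.2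

lemma keysB_inner (fm : List (List Int × List (List Int × List Int))) (n : Nat)
    (qs : List (List Int × List (List Int))) (p : List Int × List (List Int))
    (d : PySem.Dict (List Int) (PySem.Dict (List Int) (List Int)))
    (h : ∀ q ∈ qs, p.2.flatMap (fun r => q.2.flatMap (fun c => pvEntry fm r c)) ≠ [] →
      p.1 ∈ pvSpace n ∧ q.1 ∈ pvSpace n)
    (hd : d.keys = pvSpace n)
    (hin : ∀ row ∈ pvSpace n, (d.getD row PySem.Dict.empty).keys = pvSpace n) :
    (qs.foldl (fun d q =>
        let bucket := p.2.foldl (fun b r => q.2.foldl (fun b c => b ++ pvEntry fm r c) b) []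
        if bucket ≠ [] then
          d.modify p.1 PySem.Dict.empty (fun inner => inner.modify q.1 [] (fun v => v ++ bucket))
        else d) d).keys = pvSpace n ∧
    ∀ row ∈ pvSpace n, ((qs.foldl (fun d q =>
        let bucket := p.2.foldl (fun b r => q.2.foldl (fun b c => b ++ pvEntry fm r c) b) []
        if bucket ≠ [] then
          d.modify p.1 PySem.Dict.empty (fun inner => inner.modify q.1 [] (fun v => v ++ bucket))
        else d) d).getD row PySem.Dict.empty).keys = pvSpace n := by
  induction qs generalizing d with
  | nil => exact ⟨hd, hin⟩
  | cons q qs ih =>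
    simp only [List.foldl_cons]
    refine ih _ (fun q' hq' => h q' (List.mem_cons_of_mem _ hq')) ?_ ?_
    · simp only [bucket_eq]
      by_cases hB : p.2.flatMap (fun r => q.2.flatMap (fun c => pvEntry fm r c)) = []
      · simpa [hB] using hd
      · obtain ⟨hr, hc⟩ := h q (List.mem_cons_self) hB
        rw [if_pos hB, PySem.Dict.keys_modify, PySem.Dict.keys_insert_of_contains]
        · exact hd
        · exact (PySem.Dict.contains_iff_mem_keys _ _).mpr (hd ▸ hr)
    · intro row hrow
      simp only [bucket_eq]
      by_cases hB : p.2.flatMap (fun r => q.2.flatMap (fun c => pvEntry fm r c)) = []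
      · simpa [hB] using hin row hrow
      · obtain ⟨hr, hc⟩ := h q (List.mem_cons_self) hB
        rw [if_pos hB, PySem.Dict.getD_modify]
        by_cases h1 : row = p.1
        · rw [if_pos h1, PySem.Dict.keys_modify, PySem.Dict.keys_insert_of_contains]
          · exact hin _ hr
          · refine (PySem.Dict.contains_iff_mem_keys _ _).mpr ?_
            rw [hin _ hr]; exact hc
        · rw [if_neg h1]; exact hin row hrow

lemma keysB_outer (fm : List (List Int × List (List Int × List Int))) (n : Nat)
    (ps qs : List (List Int × List (List Int)))
    (d : PySem.Dict (List Int) (PySem.Dict (List Int) (List Int)))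
    (h : ∀ p ∈ ps, ∀ q ∈ qs, p.2.flatMap (fun r => q.2.flatMap (fun c => pvEntry fm r c)) ≠ [] →
      p.1 ∈ pvSpace n ∧ q.1 ∈ pvSpace n)
    (hd : d.keys = pvSpace n)
    (hin : ∀ row ∈ pvSpace n, (d.getD row PySem.Dict.empty).keys = pvSpace n) :
    (ps.foldl (fun d p => qs.foldl (fun d q =>
        let bucket := p.2.foldl (fun b r => q.2.foldl (fun b c => b ++ pvEntry fm r c) b) []
        if bucket ≠ [] then
          d.modify p.1 PySem.Dict.empty (fun inner => inner.modify q.1 [] (fun v => v ++ bucket))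
        else d) d) d).keys = pvSpace n ∧
    ∀ row ∈ pvSpace n, ((ps.foldl (fun d p => qs.foldl (fun d q =>
        let bucket := p.2.foldl (fun b r => q.2.foldl (fun b c => b ++ pvEntry fm r c) b) []
        if bucket ≠ [] then
          d.modify p.1 PySem.Dict.empty (fun inner => inner.modify q.1 [] (fun v => v ++ bucket))
        else d) d) d).getD row PySem.Dict.empty).keys = pvSpace n := by
  induction ps generalizing d with
  | nil => exact ⟨hd, hin⟩
  | cons p ps ih =>
    simp only [List.foldl_cons]
    have hstep := keysB_inner fm n qs p d (h p (List.mem_cons_self)) hd hin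
    exact ih _ (fun p' hp' => h p' (List.mem_cons_of_mem _ hp')) hstep.1 hstep.2

lemma filter_eq_nil_of_not_contains (obs : List String) (xs : List (List Int)) (k : List Int)
    (h : (pvGroups obs xs).contains k = false) :
    xs.filter (fun x => pvProj obs x = k) = [] := by
  rw [← getD_pvGroups]
  exact PySem.Dict.getD_of_not_contains _ _ h

lemma filter_items_pvGroups (obs : List String) (xs : List (List Int)) (k : List Int) :
    (pvGroups obs xs).items.filter (fun p => p.1 = k)
    = if (pvGroups obs xs).contains k = true then
        [(k, xs.filter (fun x => pvProj obs x = k))] else [] := by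
  rw [PySem.Dict.items_eq_map_keys _ (nodup_keys_pvGroups obs xs) ([] : List (List Int))]
  rw [List.filter_map]
  have hcomp : ((fun p : List Int × List (List Int) => decide (p.1 = k)) ∘
      (fun k' => (k', (pvGroups obs xs).getD k' []))) = fun k' => decide (k' = k) := rfl
  rw [hcomp, nodup_filter_eq _ (nodup_keys_pvGroups obs xs) k]
  by_cases hk : k ∈ (pvGroups obs xs).keys
  · rw [if_pos hk, if_pos ((PySem.Dict.contains_iff_mem_keys _ _).mpr hk)]
    simp [getD_pvGroups]
  · rw [if_neg hk, if_neg (fun hc => hk ((PySem.Dict.contains_iff_mem_keys _ _).mp hc))]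
    simp

lemma cell_eq (fm : List (List Int × List (List Int × List Int))) (obs : List String)
    (rows cols : List (List Int)) (row col : List Int) :
    ((pvGroups obs rows).items.filter (fun p => p.1 = row)).flatMap (fun p =>
      ((pvGroups obs cols).items.filter (fun q => q.1 = col)).flatMap (fun q =>
        p.2.flatMap (fun r => q.2.flatMap (fun c => pvEntry fm r c))))
    = pvCell rows cols fm obs row col := by
  rw [filter_items_pvGroups, filter_items_pvGroups]
  unfold pvCell
  by_cases hr : (pvGroups obs rows).contains row = true
  · rw [if_pos hr]
    by_cases hc : (pvGroups obs cols).contains col = true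
    · rw [if_pos hc]
      simp
    · rw [if_neg hc,
        filter_eq_nil_of_not_contains obs cols col (Bool.not_eq_true _ ▸ hc)]
      simp
  · rw [if_neg hr,
      filter_eq_nil_of_not_contains obs rows row (Bool.not_eq_true _ ▸ hr)]
    simp

-- ===== VERDICT (by name: the statement is the Claim_ definition above) =====
theorem project_matrix_spec : Claim_equal_project_matrix := by
  intro rows cols fm obs hdom hpre
  obtain ⟨hw, hri, hci, hkeys, hproj0⟩ := hpre
  have hproj : ∀ r ∈ rows, ∀ c ∈ cols, pvEntry fm r c ≠ [] →
      pvProj obs r ∈ pvSpace obs.length ∧ pvProj obs c ∈ pvSpace obs.length := by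
    intro r hr c hc hE
    obtain ⟨h1, h2⟩ := hproj0 r hr c hc hE
    exact ⟨(mem_pvSpace _ _).mpr ⟨length_pvProj obs r, h1⟩,
           (mem_pvSpace _ _).mpr ⟨length_pvProj obs c, h2⟩⟩
  unfold Spec_project_matrix project_matrix project_matrix_alt
  refine congrArg (fun d : PySem.Dict (List Int) (PySem.Dict (List Int) (List Int)) =>
    (pvSpace obs.length, pvSpace obs.length, d.items.map (fun p => (p.1, p.2.items)))) ?_
  have hAkeys := keysA_outer fm obs obs.length rows cols (pvInit obs.length) hproj
    (keys_pvInit obs.length) (inner_keys_pvInit obs.length)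
  have hBhyp : ∀ p ∈ (pvGroups obs rows).items, ∀ q ∈ (pvGroups obs cols).items,
      p.2.flatMap (fun r => q.2.flatMap (fun c => pvEntry fm r c)) ≠ [] →
      p.1 ∈ pvSpace obs.length ∧ q.1 ∈ pvSpace obs.length := by
    intro p hp q hq hB
    simp only [ne_eq, List.flatMap_eq_nil_iff] at hB
    push Not at hB
    obtain ⟨r, hrmem, c, hcmem, hE⟩ := hB
    rw [mem_pvGroups_val obs rows p hp] at hrmem
    rw [mem_pvGroups_val obs cols q hq] at hcmem
    obtain ⟨hrr, hrp⟩ := List.mem_filter.mp hrmem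
    obtain ⟨hcc, hcp⟩ := List.mem_filter.mp hcmem
    obtain ⟨h1, h2⟩ := hproj r hrr c hcc hE
    rw [of_decide_eq_true hrp] at h1
    rw [of_decide_eq_true hcp] at h2
    exact ⟨h1, h2⟩
  have hBkeys := keysB_outer fm obs.length (pvGroups obs rows).items (pvGroups obs cols).items
    (pvInit obs.length) hBhyp (keys_pvInit obs.length) (inner_keys_pvInit obs.length)
  apply PySem.Dict.ext
  rw [PySem.Dict.items_eq_map_keys _ (hAkeys.1 ▸ nodup_pvSpace obs.length) PySem.Dict.empty,
      PySem.Dict.items_eq_map_keys _ (hBkeys.1 ▸ nodup_pvSpace obs.length) PySem.Dict.empty,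
      hAkeys.1, hBkeys.1]
  refine List.map_congr_left ?_
  intro row hrow
  refine congrArg (Prod.mk row) ?_
  apply PySem.Dict.ext
  rw [PySem.Dict.items_eq_map_keys _
        (by rw [hAkeys.2 row hrow]; exact nodup_pvSpace obs.length) ([] : List Int),
      PySem.Dict.items_eq_map_keys _
        (by rw [hBkeys.2 row hrow]; exact nodup_pvSpace obs.length) ([] : List Int),
      hAkeys.2 row hrow, hBkeys.2 row hrow]
  refine List.map_congr_left ?_
  intro col hcol
  refine congrArg (Prod.mk col) ?_
  have hval : ∀ d : PySem.Dict (List Int) (PySem.Dict (List Int) (List Int)),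
      (d.getD row PySem.Dict.empty).getD col [] = pvVal d row col := fun _ => rfl
  rw [hval, hval, valA_outer, valB_outer, pvVal_init]
  simp only [List.nil_append]
  exact (cell_eq fm obs rows cols row col).symm
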